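-- pv_equiv track=rewrite | github.com/Miracllacy/School_work | Offline Course Auxiliary System/v0.0.2/source_code/curriculum.py | get_the_same_time
-- ===== SOURCE A (Python) =====
-- def get_the_same_time(items, time_flag):
--     flag = 0
--     i = 0
--     for item in items:
--         if item['content']:
--             flag = 1
--         else:
--             if flag == 0:
--                 i += 1
--         if item['time'] == time_flag and item['content']:
--             return item['content']
--     if flag and items[i]['content']:
--         return items[i]['content']
--     else:
--         return ""
-- ===== SOURCE B (Python) =====
-- def get_the_same_time(items, time_flag):
--     for item in items:
--         if item['content'] and item['time'] == time_flag:
--             return item['content']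
--     for item in items:
--         if item['content']:
--             return item['content']
--     return ""
-- ===== Notes on version B (the rewrite author's own statement) =====
-- stated objective: simpler
-- what changed: Replaces A's single stateful pass (flag and fallback-index bookkeeping plus a final indexed lookup) with two plain sequential scans: first scan returns the first truthy content whose time matches, second scan returns the first truthy content, else "".
import Mathlib
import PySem

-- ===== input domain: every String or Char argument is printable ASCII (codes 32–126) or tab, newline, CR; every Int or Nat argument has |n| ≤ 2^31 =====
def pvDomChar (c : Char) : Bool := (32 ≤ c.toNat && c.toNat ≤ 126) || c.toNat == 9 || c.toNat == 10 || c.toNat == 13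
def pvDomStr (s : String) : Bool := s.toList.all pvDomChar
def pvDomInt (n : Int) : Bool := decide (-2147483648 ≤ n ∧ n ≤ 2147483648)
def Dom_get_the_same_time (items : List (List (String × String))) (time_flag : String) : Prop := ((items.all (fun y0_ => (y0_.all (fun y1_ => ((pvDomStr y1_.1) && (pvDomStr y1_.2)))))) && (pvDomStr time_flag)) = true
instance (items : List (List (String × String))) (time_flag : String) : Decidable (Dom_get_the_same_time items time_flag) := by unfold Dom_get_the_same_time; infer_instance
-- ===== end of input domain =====

-- B replaces A's stateful flag/index single pass with two plain sequential scans (simpler decomposition, same O(n) cost).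


-- shared dict-access helper: item[k]; lookup = none is Python's KeyError, excluded by Pre_,
-- so the "" in the none branch is unreachable on admitted inputs
def pvItemGet (item : List (String × String)) (k : String) : String :=
  match item.lookup k with
  | some v => v
  | none => ""

-- ===== PORT A =====
-- the final 'if flag and items[i]['content']: return items[i]['content'] else: return ""'
-- (items.getD i [] = items[i]: i is a nonnegative in-range index whenever flag ≠ 0)
def pvA_final (items : List (List (String × String))) (i : Nat) : String :=
  if pvItemGet (items.getD i []) "content" ≠ "" then pvItemGet (items.getD i []) "content" else ""

-- the 'for item in items' loop carrying flag and i exactly as A does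
def pvA_loop (items : List (List (String × String))) (tf : String)
    (rest : List (List (String × String))) (flag : Nat) (i : Nat) : String :=
  match rest with
  | [] => if flag ≠ 0 then pvA_final items i else ""
  | item :: rest' =>
      let c := pvItemGet item "content"
      let flag' := if c ≠ "" then 1 else flag
      let i' := if c ≠ "" then i else (if flag = 0 then i + 1 else i)
      if pvItemGet item "time" = tf ∧ c ≠ "" then c
      else pvA_loop items tf rest' flag' i'

def get_the_same_time (items : List (List (String × String))) (time_flag : String) : String :=
  pvA_loop items time_flag items 0 0

-- ===== PORT B =====
-- first pass: first item with truthy content and matching time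
def pvB_pass1 (rest : List (List (String × String))) (tf : String) : Option String :=
  match rest with
  | [] => none
  | item :: rest' =>
      let c := pvItemGet item "content"
      if c ≠ "" ∧ pvItemGet item "time" = tf then some c else pvB_pass1 rest' tf

-- second pass: first item with truthy content
def pvB_pass2 (rest : List (List (String × String))) : Option String :=
  match rest with
  | [] => none
  | item :: rest' =>
      let c := pvItemGet item "content"
      if c ≠ "" then some c else pvB_pass2 rest'

def get_the_same_time_alt (items : List (List (String × String))) (time_flag : String) : String :=
  match pvB_pass1 items time_flag with
  | some c => c
  | none =>
      match pvB_pass2 items with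
      | some c => c
      | none => ""

-- ===== PRECONDITION & SPEC =====
-- item has both keys A looks up
def pvKeysOk (item : List (String × String)) : Bool :=
  (item.lookup "content").isSome && (item.lookup "time").isSome

-- the early-return test of the loop: truthy content and matching time
def pvIsMatch (item : List (String × String)) (tf : String) : Bool :=
  (pvItemGet item "content" != "") && (pvItemGet item "time" == tf)

-- Pre_ excludes exactly the inputs on which A raises KeyError: some item reached by the loop
-- (i.e. not preceded by an early-returning match) lacks a 'content' or 'time' key.
def Pre_get_the_same_time (items : List (List (String × String))) (time_flag : String) : Prop :=
  ∀ j : Nat, j < items.length →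
    (∀ k : Nat, k < j → pvIsMatch (items.getD k []) time_flag = false) →
    pvKeysOk (items.getD j []) = true
instance (items : List (List (String × String))) (time_flag : String) : Decidable (Pre_get_the_same_time items time_flag) := by unfold Pre_get_the_same_time; infer_instance

def pvWitness_get_the_same_time : (List (List (String × String))) × String :=
  ([[("content", "x"), ("time", "t")]], "t")

def Spec_get_the_same_time (items : List (List (String × String))) (time_flag : String) (out : String) : Prop := out = get_the_same_time_alt items time_flag
instance (items : List (List (String × String))) (time_flag : String) (out : String) : Decidable (Spec_get_the_same_time items time_flag out) := by unfold Spec_get_the_same_time; infer_instance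

-- ===== CLAIM (what is proved, stated in full; the proofs are below) =====
def Claim_equal_get_the_same_time : Prop := ∀ (items : List (List (String × String))) (time_flag : String), Dom_get_the_same_time items time_flag → Pre_get_the_same_time items time_flag → Spec_get_the_same_time items time_flag (get_the_same_time items time_flag)

-- ===== LEMMAS AND PROOFS =====

-- if the first pass finds a match in rest, A's loop returns it whatever its flag/i state is
theorem pvA_loop_of_pass1 (items : List (List (String × String))) (tf : String) :
    ∀ (rest : List (List (String × String))) (flag i : Nat) (c : String),
      pvB_pass1 rest tf = some c → pvA_loop items tf rest flag i = c := by
  intro rest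
  induction rest with
  | nil => intro flag i c h; simp [pvB_pass1] at h
  | cons item rest' ih =>
      intro flag i c h
      simp only [pvB_pass1] at h
      simp only [pvA_loop]
      by_cases hm : pvItemGet item "time" = tf ∧ pvItemGet item "content" ≠ ""
      · rw [if_pos (And.intro hm.2 hm.1)] at h
        rw [if_pos hm]
        exact Option.some.inj h
      · rw [if_neg (fun hB => hm (And.intro hB.2 hB.1))] at h
        rw [if_neg hm]
        exact ih _ _ _ h

-- once flag = 1 and no match remains, the loop keeps i fixed and ends in the final lookup
theorem pvA_loop_flag_one (items : List (List (String × String))) (tf : String) :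
    ∀ (rest : List (List (String × String))) (i : Nat),
      pvB_pass1 rest tf = none → pvA_loop items tf rest 1 i = pvA_final items i := by
  intro rest
  induction rest with
  | nil => intro i _; simp [pvA_loop]
  | cons item rest' ih =>
      intro i h
      simp only [pvB_pass1] at h
      by_cases hm' : pvItemGet item "content" ≠ "" ∧ pvItemGet item "time" = tf
      · rw [if_pos hm'] at h; exact absurd h (by simp)
      · rw [if_neg hm'] at h
        simp only [pvA_loop]
        rw [if_neg (fun hB => hm' (And.intro hB.2 hB.1))]
        by_cases hc : pvItemGet item "content" ≠ ""
        · simp only [if_pos hc]; exact ih i h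
        · simp only [if_neg hc]
          rw [if_neg (Nat.one_ne_zero)]
          exact ih i h

-- items[i] when the untraversed suffix starts at index i
theorem getD_of_drop (items rest' : List (List (String × String)))
    (item : List (String × String)) (i : Nat) (h : items.drop i = item :: rest') :
    items.getD i [] = item := by
  have hg : items[i]? = some item := by
    have h0 : (items.drop i)[0]? = some item := by rw [h]; rfl
    rw [List.getElem?_drop] at h0
    simpa using h0
  rw [List.getD_eq_getElem?_getD, hg]
  rfl

-- main invariant: started with flag = 0 on the suffix items.drop i, A's loop computes B's answer on that suffix
theorem pvA_loop_drop (items : List (List (String × String))) (tf : String) :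
    ∀ (rest : List (List (String × String))) (i : Nat), items.drop i = rest →
      pvA_loop items tf rest 0 i =
        (match pvB_pass1 rest tf with
         | some c => c
         | none => match pvB_pass2 rest with | some c => c | none => "") := by
  intro rest
  induction rest with
  | nil => intro i _; simp [pvA_loop, pvB_pass1, pvB_pass2]
  | cons item rest' ih =>
      intro i hdrop
      simp only [pvA_loop, pvB_pass1, pvB_pass2]
      by_cases hm : pvItemGet item "time" = tf ∧ pvItemGet item "content" ≠ ""
      · rw [if_pos hm, if_pos (And.intro hm.2 hm.1)]
      · have hm2 : ¬(pvItemGet item "content" ≠ "" ∧ pvItemGet item "time" = tf) :=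
          fun hB => hm (And.intro hB.2 hB.1)
        rw [if_neg hm, if_neg hm2]
        by_cases hc : pvItemGet item "content" ≠ ""
        · -- truthy, non-matching head: flag becomes 1, i frozen; items[i] = item is the first truthy item
          rw [if_pos hc, if_pos hc, if_pos hc]
          cases hp : pvB_pass1 rest' tf with
          | some c => rw [pvA_loop_of_pass1 items tf rest' 1 i c hp]
          | none =>
              rw [pvA_loop_flag_one items tf rest' i hp]
              simp only [pvA_final, getD_of_drop items rest' item i hdrop, if_pos hc]
        · -- falsy head: i advances, the suffix relation is preserved
          have hdrop' : items.drop (i + 1) = rest' := by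
            have h1 := congrArg (List.drop 1) hdrop
            simpa [List.drop_drop, Nat.add_comm] using h1
          rw [if_neg hc, if_neg hc, if_true, if_neg hc]
          exact ih (i + 1) hdrop'

-- ===== VERDICT (by name: the statement is the Claim_ definition above) =====
theorem get_the_same_time_spec : Claim_equal_get_the_same_time := by
  intro items time_flag _ _
  unfold Spec_get_the_same_time get_the_same_time get_the_same_time_alt
  exact pvA_loop_drop items time_flag items 0 rfl
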